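-- pv_equiv track=rewrite | github.com/cirosantilli/project-euler-solvers | solvers/140.py | nuggets
-- ===== SOURCE A (Python) =====
-- from math import isqrt, sqrt
--
-- def nuggets(count: int):
--     """
--     Generate the first `count` golden nuggets n, using a Pell-type recurrence
--     via the m-sequence:
--         m = [7, 14, 50, 97]
--         m_k = 7*m_{k-2} - m_{k-4}
--     Then n = (sqrt(5m^2+44)-7)/5
--     """
--     m = [7, 14, 50, 97]
--     while len(m) < count:
--         m.append(7 * m[-2] - m[-4])
--
--     ns = []
--     for mm in m[:count]:
--         X2 = 5 * mm * mm + 44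
--         X = isqrt(X2)
--         if X * X != X2:
--             raise RuntimeError("Internal error: expected a perfect square.")
--         n = (X - 7) // 5
--         ns.append(n)
--     return ns
-- ===== SOURCE B (Python) =====
-- def nuggets(count: int):
--     """
--     First `count` golden nuggets directly via the linear recurrence on the
--     nugget values themselves: n_k = 7*n_{k-2} - n_{k-4} + 7, seeded 2, 5, 21, 42.
--     No m-sequence, no per-term isqrt.
--     """
--     ns = []
--     a, b, c, d = 2, 5, 21, 42
--     for _ in range(max(count, 0)):
--         ns.append(a)
--         a, b, c, d = b, c, d, 7 * c - a + 7
--     return ns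
-- ===== Notes on version B (the rewrite author's own statement) =====
-- stated objective: faster
-- what changed: B generates the nugget values n directly by the linear recurrence n_k = 7*n_{k-2} - n_{k-4} + 7 with a rolling 4-tuple of seeds, eliminating A's m-list and the per-term isqrt of a growing perfect square.
-- intended difference: For count in {-1,-2,-3} A returns a nonempty prefix of the nugget sequence, an accident of Python's negative slice m[:count]; B returns an empty list, the intended answer since a nonpositive count asks for no nuggets. — e.g. on nuggets(-1): A returns [2, 5, 21], B returns []
import Mathlib
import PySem

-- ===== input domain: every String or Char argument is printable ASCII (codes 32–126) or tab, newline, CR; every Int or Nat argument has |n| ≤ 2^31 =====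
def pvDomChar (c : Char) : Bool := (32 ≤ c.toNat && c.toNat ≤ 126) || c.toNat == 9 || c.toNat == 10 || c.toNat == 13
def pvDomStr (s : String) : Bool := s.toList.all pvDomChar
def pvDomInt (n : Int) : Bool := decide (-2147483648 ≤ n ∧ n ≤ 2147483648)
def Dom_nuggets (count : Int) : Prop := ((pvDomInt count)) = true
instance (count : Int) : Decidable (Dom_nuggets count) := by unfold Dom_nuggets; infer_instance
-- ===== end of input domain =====

-- B generates the nugget values directly via the linear recurrence n_k = 7*n_{k-2} - n_{k-4} + 7,
-- dropping A's m-sequence and per-term isqrt (objective: faster, constant-factor; measured).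


-- ===== PORT A =====
-- while len(m) < count: m.append(7*m[-2] - m[-4]); fuel = number of iterations left.
-- The `.getD 0` default on m[-2]/m[-4] is never taken: m always has ≥ 4 elements.
def growM : Nat → List Int → List Int
  | 0, m => m
  | f + 1, m =>
      growM f (m ++ [7 * (PySem.List.pyGet? m (-2)).getD 0 - (PySem.List.pyGet? m (-4)).getD 0])

-- the ns-building for-loop; `none` models the `raise RuntimeError` (never reached on A's data).
-- math.isqrt(X2) on the nonnegative X2 is Nat.sqrt of its Nat value.
def procA : List Int → Option (List Int)
  | [] => some []
  | mm :: rest =>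
      let X2 : Int := 5 * mm * mm + 44
      let X : Int := ((Nat.sqrt X2.toNat : Nat) : Int)
      if X * X = X2 then (procA rest).map (fun ns => PySem.Int.floordiv (X - 7) 5 :: ns)
      else none

def nuggets (count : Int) : List Int :=
  let m := growM (count - 4).toNat [7, 14, 50, 97]
  (procA (PySem.List.slice m none (some count))).getD []

-- ===== PORT B =====
-- for _ in range(max(count,0)): ns.append(a); a,b,c,d = b,c,d,7*c-a+7
def goB : Nat → Int → Int → Int → Int → List Int
  | 0, _, _, _, _ => []
  | k + 1, a, b, c, d => a :: goB k b c d (7 * c - a + 7)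

def nuggets_alt (count : Int) : List Int :=
  goB (max count 0).toNat 2 5 21 42

-- ===== PRECONDITION & SPEC =====
-- For count in {-1,-2,-3} A returns a nonempty prefix of the nuggets (an accident of the
-- negative slice m[:count]); B returns [], the intended answer for a nonpositive count.
def D_nuggets (count : Int) : Prop := -3 ≤ count ∧ count ≤ -1
instance (count : Int) : Decidable (D_nuggets count) := by unfold D_nuggets; infer_instance

def Spec_nuggets (count : Int) (out : List Int) : Prop := ¬ D_nuggets count → out = nuggets_alt count
instance (count : Int) (out : List Int) : Decidable (Spec_nuggets count out) := by
  unfold Spec_nuggets; infer_instance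

def pvDiffWitness_nuggets : Int := -1
def pvDiffWitnessOut_nuggets : (List Int) × (List Int) := ([2, 5, 21], [])

-- ===== CLAIM =====
def Claim_unchanged_nuggets : Prop := ∀ (count : Int), Dom_nuggets count → Spec_nuggets count (nuggets count)
def Claim_changed_nuggets : Prop := Dom_nuggets (pvDiffWitness_nuggets) ∧ D_nuggets (pvDiffWitness_nuggets) ∧ nuggets (pvDiffWitness_nuggets) = pvDiffWitnessOut_nuggets.1 ∧ nuggets_alt (pvDiffWitness_nuggets) = pvDiffWitnessOut_nuggets.2 ∧ pvDiffWitnessOut_nuggets.1 ≠ pvDiffWitnessOut_nuggets.2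
def Claim_exact_nuggets : Prop := ∀ (count : Int), Dom_nuggets count → D_nuggets count → nuggets count ≠ nuggets_alt count

-- ===== LEMMAS AND PROOFS =====

theorem nuggets_eq (count : Int) :
    nuggets count
      = (procA (PySem.List.slice (growM (count - 4).toNat [7, 14, 50, 97]) none (some count))).getD [] := rfl

-- the mathematical m- and n-sequences
def mseq : Nat → Int
  | 0 => 7 | 1 => 14 | 2 => 50 | 3 => 97
  | k + 4 => 7 * mseq (k + 2) - mseq k

def nseq : Nat → Int
  | 0 => 2 | 1 => 5 | 2 => 21 | 3 => 42
  | k + 4 => 7 * nseq (k + 2) - nseq k + 7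

-- Pell-style invariant carried two steps at a time
theorem inv_nm : ∀ k : Nat,
    (5 * nseq k + 7) ^ 2 - 5 * (mseq k) ^ 2 = 44 ∧
    (5 * nseq (k + 2) + 7) ^ 2 - 5 * (mseq (k + 2)) ^ 2 = 44 ∧
    (5 * nseq (k + 2) + 7) * (5 * nseq k + 7) - 5 * (mseq (k + 2) * mseq k) = 154
  | 0 => by norm_num [nseq, mseq]
  | 1 => by norm_num [nseq, mseq]
  | k + 2 => by
      obtain ⟨h1, h2, h3⟩ := inv_nm k
      refine ⟨h2, ?_, ?_⟩
      · have e1 : nseq (k + 4) = 7 * nseq (k + 2) - nseq k + 7 := by simp [nseq]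
        have e2 : mseq (k + 4) = 7 * mseq (k + 2) - mseq k := by simp [mseq]
        rw [e1, e2]; nlinarith [h1, h2, h3]
      · have e1 : nseq (k + 4) = 7 * nseq (k + 2) - nseq k + 7 := by simp [nseq]
        have e2 : mseq (k + 4) = 7 * mseq (k + 2) - mseq k := by simp [mseq]
        rw [e1, e2]; nlinarith [h1, h2, h3]

theorem nseq_nonneg : ∀ k : Nat, 0 ≤ nseq k ∧ nseq k ≤ nseq (k + 2)
  | 0 => by norm_num [nseq]
  | 1 => by norm_num [nseq]
  | k + 2 => by
      obtain ⟨h0, h1⟩ := nseq_nonneg k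
      have e1 : nseq (k + 4) = 7 * nseq (k + 2) - nseq k + 7 := by simp [nseq]
      constructor
      · omega
      · rw [e1]; omega

theorem key_nm (k : Nat) : 5 * mseq k * mseq k + 44 = (5 * nseq k + 7) * (5 * nseq k + 7) := by
  have h := (inv_nm k).1
  nlinarith [h]

-- procA succeeds on m-values and yields the n-values
theorem procA_mseq : ∀ ks : List Nat, procA (ks.map mseq) = some (ks.map nseq) := by
  intro ks
  induction ks with
  | nil => rfl
  | cons k rest ih =>
      have hn : 0 ≤ nseq k := (nseq_nonneg k).1
      have hX2 : 5 * mseq k * mseq k + 44 = (5 * nseq k + 7) * (5 * nseq k + 7) := key_nm k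
      have hXpos : 0 ≤ 5 * nseq k + 7 := by omega
      have htn : (5 * mseq k * mseq k + 44).toNat = (5 * nseq k + 7).toNat * (5 * nseq k + 7).toNat := by
        rw [hX2]; exact Int.toNat_mul hXpos hXpos
      have hsqrt : ((Nat.sqrt (5 * mseq k * mseq k + 44).toNat : Nat) : Int) = 5 * nseq k + 7 := by
        rw [htn, Nat.sqrt_eq, Int.toNat_of_nonneg hXpos]
      simp only [List.map_cons, procA, hsqrt]
      rw [if_pos (by linarith [hX2])]
      rw [ih]
      clear ih
      have hdiv : PySem.Int.floordiv (5 * nseq k + 7 - 7) 5 = nseq k := by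
        rw [PySem.Int.floordiv_eq_ediv_of_pos (by norm_num)]
        have : 5 * nseq k + 7 - 7 = 5 * nseq k := by ring
        rw [this, Int.mul_ediv_cancel_left _ (by norm_num)]
      simp only [Option.map_some, hdiv]

-- the while-loop extends the m-list along mseq
theorem growM_mseq : ∀ (f L : Nat), 4 ≤ L →
    growM f ((List.range L).map mseq) = (List.range (L + f)).map mseq := by
  intro f
  induction f with
  | zero => intro L _; simp [growM]
  | succ f ih =>
      intro L hL
      obtain ⟨j, rfl⟩ : ∃ j, L = j + 4 := ⟨L - 4, by omega⟩
      have hlen : ((List.range (j + 4)).map mseq).length = j + 4 := by simp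
      have h2 : PySem.List.pyGet? ((List.range (j + 4)).map mseq) (-2) = some (mseq (j + 2)) := by
        rw [PySem.List.pyGet?_neg_ofNat _ 2 (by omega) (by simp)]
        simp [hlen]
      have h4 : PySem.List.pyGet? ((List.range (j + 4)).map mseq) (-4) = some (mseq j) := by
        rw [PySem.List.pyGet?_neg_ofNat _ 4 (by omega) (by simp)]
        simp [hlen]
      have happ : (List.range (j + 4)).map mseq ++ [7 * mseq (j + 2) - mseq j]
          = (List.range (j + 5)).map mseq := by
        have : mseq (j + 4) = 7 * mseq (j + 2) - mseq j := by simp [mseq]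
        simp [List.range_succ, this]
      rw [show j + 4 + (f + 1) = j + 5 + f by omega,
          growM, h2, h4, Option.getD_some, Option.getD_some, happ, ih (j + 5) (by omega)]

-- B's rolling loop produces the n-values
theorem goB_nseq : ∀ (K k : Nat),
    goB K (nseq k) (nseq (k + 1)) (nseq (k + 2)) (nseq (k + 3))
      = (List.range K).map (fun i => nseq (k + i)) := by
  intro K
  induction K with
  | zero => intro k; rfl
  | succ K ih =>
      intro k
      have e : 7 * nseq (k + 2) - nseq k + 7 = nseq (k + 1 + 3) := by
        have : nseq (k + 4) = 7 * nseq (k + 2) - nseq k + 7 := by simp [nseq]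
        rw [this]
      rw [goB, e]
      have := ih (k + 1)
      rw [show k + 1 + 1 = k + 2 from rfl, show k + 1 + 2 = k + 3 from rfl] at this
      rw [this, List.range_succ_eq_map, List.map_cons, List.map_map]
      congr 1
      apply List.map_congr_left
      intro i _
      simp [Function.comp]
      congr 1
      omega

theorem nuggets_alt_eq (count : Int) :
    nuggets_alt count = (List.range count.toNat).map nseq := by
  unfold nuggets_alt
  have hm : (max count 0).toNat = count.toNat := by omega
  rw [hm]
  have := goB_nseq count.toNat 0
  simpa using this

-- A's value on the three quirky negative counts (via the generic procA/mseq lemmas)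
theorem nuggets_neg1 : nuggets (-1) = [2, 5, 21] := by
  rw [nuggets_eq]
  show (procA (List.map mseq [0, 1, 2])).getD [] = [2, 5, 21]
  rw [procA_mseq [0, 1, 2]]; rfl

theorem nuggets_neg2 : nuggets (-2) = [2, 5] := by
  rw [nuggets_eq]
  show (procA (List.map mseq [0, 1])).getD [] = [2, 5]
  rw [procA_mseq [0, 1]]; rfl

theorem nuggets_neg3 : nuggets (-3) = [2] := by
  rw [nuggets_eq]
  show (procA (List.map mseq [0])).getD [] = [2]
  rw [procA_mseq [0]]; rfl

-- ===== VERDICT =====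
theorem nuggets_spec : Claim_unchanged_nuggets := by
  intro count _ hD
  unfold D_nuggets at hD
  by_cases hneg : count ≤ -4
  · -- m stays the 4 seeds; the slice is empty, and so is B's output
    have hfuel : (count - 4).toNat = 0 := by omega
    have hsl : PySem.List.slice ([7, 14, 50, 97] : List Int) none (some count) = [] := by
      obtain ⟨k, hk4, hk⟩ : ∃ k : Nat, 4 ≤ k ∧ count = -(k : Int) :=
        ⟨(-count).toNat, by omega, by omega⟩
      rw [hk, PySem.List.slice_to_neg_natCast _ k (by omega)]
      have h0 : ([7, 14, 50, 97] : List Int).length - k = 0 := by simp; omega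
      rw [h0, List.take_zero]
    have hb : nuggets_alt count = [] := by
      unfold nuggets_alt
      rw [show (max count 0).toNat = 0 by omega]
      rfl
    rw [nuggets_eq, hfuel, show growM 0 [7, 14, 50, 97] = [7, 14, 50, 97] from rfl, hsl, hb]
    rfl
  · -- count ≥ 0
    have hpos : 0 ≤ count := by omega
    rw [nuggets_eq,
        show ([7, 14, 50, 97] : List Int) = (List.range 4).map mseq by decide,
        growM_mseq (count - 4).toNat 4 (by omega)]
    set K := count.toNat with hK
    have hcnt : count = (K : Int) := by omega
    rw [hcnt, PySem.List.slice_to_natCast]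
    have hmin : min K (4 + (((K : Int)) - 4).toNat) = K := by omega
    have htake : ((List.range (4 + (((K : Int)) - 4).toNat)).map mseq).take K
        = (List.range K).map mseq := by
      rw [← List.map_take, List.take_range, hmin]
    rw [htake, procA_mseq (List.range K), Option.getD_some,
        nuggets_alt_eq]
    simp

theorem nuggets_changed : Claim_changed_nuggets := by
  unfold Claim_changed_nuggets
  refine ⟨by decide, by decide, nuggets_neg1, by decide, by decide⟩

theorem nuggets_tight : Claim_exact_nuggets := by
  intro count _ hD
  unfold D_nuggets at hD
  obtain ⟨hd1, hd2⟩ := hD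
  interval_cases count
  · rw [nuggets_neg3]; decide
  · rw [nuggets_neg2]; decide
  · rw [nuggets_neg1]; decide
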